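-- pv_equiv track=rewrite | github.com/gmrvl/python_ege_2223 | 23/47020.py | f
-- ===== SOURCE A (Python) =====
-- def f(x, y, Flag):
--     if x > y:
--         return 0
--     if x == y:
--         return 1
--     elif Flag:
--         return f(x + 1, y, True) + f(x + 2, y, True) + f(x * 2, y, False)
--     else:
--         return f(x + 1, y, True) + f(x + 2, y, True)
-- ===== SOURCE B (Python) =====
-- def f(x, y, Flag):
--     # Bottom-up DP over values v = y..x with two tables (Flag=True / Flag=False).
--     if x > y:
--         return 0
--     T = {}
--     F = {}
--
--     def tv(w):
--         if w == y:
--             return 1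
--         if w > y:
--             return 0
--         return T.get(w, 0)
--
--     v = y
--     while v >= x:
--         if v == y:
--             T[v] = 1
--             F[v] = 1
--         else:
--             s = tv(v + 1) + tv(v + 2)
--             F[v] = s
--             c = 2 * v
--             T[v] = s + (0 if c > y else F.get(c, 0))
--         v -= 1
--     return T[x] if Flag else F[x]
-- ===== Notes on version B (the rewrite author's own statement) =====
-- stated objective: alternative
-- what changed: A's branching recursion over (x, Flag) is replaced by a bottom-up dynamic program that fills two tables (one per Flag) for v = y down to x, computing each state once.
import Mathlib
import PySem

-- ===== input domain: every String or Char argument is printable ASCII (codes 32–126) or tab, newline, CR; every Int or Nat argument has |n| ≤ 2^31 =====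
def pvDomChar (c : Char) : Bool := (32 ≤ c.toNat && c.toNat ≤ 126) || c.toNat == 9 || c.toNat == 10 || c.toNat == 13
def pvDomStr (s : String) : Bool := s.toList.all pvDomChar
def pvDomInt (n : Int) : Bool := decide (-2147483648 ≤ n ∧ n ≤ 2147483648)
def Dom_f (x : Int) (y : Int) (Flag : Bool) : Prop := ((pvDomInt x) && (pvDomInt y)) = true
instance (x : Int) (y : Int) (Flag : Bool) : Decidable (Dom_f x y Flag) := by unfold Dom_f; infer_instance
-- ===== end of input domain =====

-- B replaces A's branching recursion by a bottom-up DP over values v = y..x with two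
-- tables (one per Flag); equivalence is proved on the inputs where A terminates.

-- ===== PORT A =====
-- A is a plain recursion; ported with a fuel counter that is large enough on every input
-- where the Python terminates (the same computation, made total).
def fA : Nat → Int → Int → Bool → Int
  | 0, _, _, _ => 0
  | fuel + 1, x, y, Flag =>
    if x > y then 0
    else if x = y then 1
    else if Flag then
      fA fuel (x + 1) y true + fA fuel (x + 2) y true + fA fuel (x * 2) y false
    else
      fA fuel (x + 1) y true + fA fuel (x + 2) y true

def f (x : Int) (y : Int) (Flag : Bool) : Int :=
  fA (2 * (y - x) + 2).toNat x y Flag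

-- ===== PORT B =====
-- tv(w) from Source B
def tvB (T : PySem.Dict Int Int) (y w : Int) : Int :=
  if w = y then 1 else if w > y then 0 else T.getD w 0

-- the while-loop of Source B: v runs from y down to x, filling T (Flag=True) and F (Flag=False)
def loopB (x y : Int) (v : Int) (T F : PySem.Dict Int Int) :
    PySem.Dict Int Int × PySem.Dict Int Int :=
  if _h : v ≥ x then
    if v = y then
      loopB x y (v - 1) (T.insert v 1) (F.insert v 1)
    else
      let s := tvB T y (v + 1) + tvB T y (v + 2)
      let F' := F.insert v s
      let c := 2 * v
      loopB x y (v - 1) (T.insert v (s + (if c > y then 0 else F'.getD c 0))) F'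
  else
    (T, F)
termination_by (v - x + 1).toNat
decreasing_by all_goals omega

def f_alt (x : Int) (y : Int) (Flag : Bool) : Int :=
  if x > y then 0
  else
    let st := loopB x y y PySem.Dict.empty PySem.Dict.empty
    if Flag then st.1.getD x 0 else st.2.getD x 0

-- ===== PRECONDITION & SPEC =====
-- Pre_f is exactly the set of inputs on which the Python A terminates; on its complement
-- (x ≤ -1 with Flag and x < y, or x ≤ -2 with x + 1 < y) the recursion passes through
-- f(2x, False) and never reaches a base case, so A raises RecursionError.
def Pre_f (x : Int) (y : Int) (Flag : Bool) : Prop :=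
  y ≤ x ∨ 0 ≤ x ∨ (Flag = false ∧ (-1 ≤ x ∨ y ≤ x + 1))
instance (x : Int) (y : Int) (Flag : Bool) : Decidable (Pre_f x y Flag) := by
  unfold Pre_f; infer_instance

def pvWitness_f : Int × Int × Bool := (0, 6, true)

def Spec_f (x : Int) (y : Int) (Flag : Bool) (out : Int) : Prop := out = f_alt x y Flag
instance (x : Int) (y : Int) (Flag : Bool) (out : Int) : Decidable (Spec_f x y Flag out) := by
  unfold Spec_f; infer_instance

-- ===== CLAIM (what is proved, stated in full; the proofs are below) =====
def Claim_equal_f : Prop := ∀ (x : Int) (y : Int) (Flag : Bool),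
  Dom_f x y Flag → Pre_f x y Flag → Spec_f x y Flag (f x y Flag)

-- ===== LEMMAS AND PROOFS =====

-- reference function: the mathematical value of A's recursion on its halting set
-- (junk 0 where A diverges, guarded to make the recursion well founded)
def g (x y : Int) (Flag : Bool) : Int :=
  if y < x then 0
  else if x = y then 1
  else if (Flag = true ∧ x ≤ -1) ∨ (Flag = false ∧ x ≤ -2 ∧ x + 1 < y) then 0
  else if Flag then
    g (x + 1) y true + g (x + 2) y true + g (x * 2) y false
  else
    g (x + 1) y true + g (x + 2) y true
termination_by (2 * (y - x) + (if Flag then 1 else 0)).toNat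
decreasing_by all_goals (first | omega | (simp_all; omega) | simp_all)

lemma g_gt (x y : Int) (Flag : Bool) (h : y < x) : g x y Flag = 0 := by
  rw [g]; simp [h]

lemma g_self (y : Int) (Flag : Bool) : g y y Flag = 1 := by
  rw [g]; simp

lemma g_step_false (x y : Int) (hx : -1 ≤ x ∨ y ≤ x + 1) (hlt : x < y) :
    g x y false = g (x + 1) y true + g (x + 2) y true := by
  rw [g, if_neg (by omega : ¬ y < x), if_neg (by omega : ¬ x = y),
    if_neg (show ¬ (((false : Bool) = true ∧ x ≤ -1) ∨
      ((false : Bool) = false ∧ x ≤ -2 ∧ x + 1 < y)) by simp; omega)]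
  simp

lemma g_step_true (x y : Int) (hx : 0 ≤ x) (hlt : x < y) :
    g x y true = g (x + 1) y true + g (x + 2) y true + g (x * 2) y false := by
  rw [g, if_neg (by omega : ¬ y < x), if_neg (by omega : ¬ x = y),
    if_neg (show ¬ (((true : Bool) = true ∧ x ≤ -1) ∨
      ((true : Bool) = false ∧ x ≤ -2 ∧ x + 1 < y)) by simp; omega)]
  simp

lemma fA_eq_g : ∀ (fuel : Nat) (x y : Int) (Flag : Bool),
    (x ≤ y → ((0 ≤ x ∨ x = y ∨ (Flag = false ∧ (-1 ≤ x ∨ y ≤ x + 1))) ∧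
      (2 * (y - x) + (if Flag then 1 else 0)).toNat < fuel)) →
    fA fuel x y Flag = g x y Flag := by
  intro fuel
  induction fuel with
  | zero =>
    intro x y Flag h
    by_cases hxy : x ≤ y
    · exact absurd (h hxy).2 (Nat.not_lt_zero _)
    · push_neg at hxy
      simp [fA, g_gt x y Flag hxy]
  | succ n ih =>
    intro x y Flag h
    by_cases hgt : y < x
    · simp [fA, hgt, g_gt x y Flag hgt]
    · push_neg at hgt
      obtain ⟨hside, hfuel⟩ := h hgt
      by_cases heq : x = y
      · subst heq; simp [fA, g_self]
      · have hlt : x < y := lt_of_le_of_ne hgt heq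
        have hny : ¬ x > y := not_lt_of_ge hgt
        cases Flag with
        | true =>
          have hx : 0 ≤ x := by
            rcases hside with h' | h' | h'
            · exact h'
            · exact absurd h' heq
            · exact absurd h'.1 (by simp)
          simp only [if_true] at hfuel
          have h1 : fA n (x + 1) y true = g (x + 1) y true := by
            apply ih; intro _
            exact ⟨Or.inl (by omega), by simp only [if_true]; omega⟩
          have h2 : fA n (x + 2) y true = g (x + 2) y true := by
            apply ih; intro _
            exact ⟨Or.inl (by omega), by simp only [if_true]; omega⟩
          have h3 : fA n (x * 2) y false = g (x * 2) y false := by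
            apply ih; intro _
            refine ⟨Or.inl (by omega), ?_⟩
            simp only [Bool.false_eq_true, if_false]
            omega
          have hfA : fA (n + 1) x y true =
              fA n (x + 1) y true + fA n (x + 2) y true + fA n (x * 2) y false := by
            simp [fA, hny, heq]
          rw [hfA, h1, h2, h3, g_step_true x y hx hlt]
        | false =>
          have hcl : -1 ≤ x ∨ y ≤ x + 1 := by
            rcases hside with h' | h' | h'
            · left; omega
            · exact absurd h' heq
            · exact h'.2
          simp only [Bool.false_eq_true, if_false] at hfuel
          have h1 : fA n (x + 1) y true = g (x + 1) y true := by
            apply ih; intro _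
            refine ⟨?_, by simp only [if_true]; omega⟩
            have : 0 ≤ x + 1 ∨ x + 1 = y := by omega
            rcases this with h' | h'
            · exact Or.inl h'
            · exact Or.inr (Or.inl h')
          have h2 : fA n (x + 2) y true = g (x + 2) y true := by
            apply ih; intro hle
            refine ⟨?_, by simp only [if_true]; omega⟩
            have : 0 ≤ x + 2 ∨ x + 2 = y := by omega
            rcases this with h' | h'
            · exact Or.inl h'
            · exact Or.inr (Or.inl h')
          have hfA : fA (n + 1) x y false =
              fA n (x + 1) y true + fA n (x + 2) y true := by
            simp [fA, hny, heq]
          rw [hfA, h1, h2, g_step_false x y hcl hlt]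

lemma f_eq_g (x y : Int) (Flag : Bool) (h : Pre_f x y Flag) : f x y Flag = g x y Flag := by
  unfold f
  apply fA_eq_g
  intro hxy
  unfold Pre_f at h
  constructor
  · rcases h with h | h | h
    · exact Or.inr (Or.inl (by omega))
    · exact Or.inl h
    · exact Or.inr (Or.inr h)
  · cases Flag <;> simp <;> omega

-- the invariant carried by loopB's descent: tables agree with g on all filled entries
def DPInv (y v : Int) (T F : PySem.Dict Int Int) : Prop :=
  ∀ w : Int, v < w → w ≤ y →
    ((0 ≤ w ∨ w = y) → T.getD w 0 = g w y true) ∧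
    ((0 ≤ w ∨ w = -1 ∨ y ≤ w + 1) → F.getD w 0 = g w y false)

lemma tvB_eq (T : PySem.Dict Int Int) (y v w : Int) (hv : v < w)
    (hinv : w ≤ y → T.getD w 0 = g w y true) :
    tvB T y w = g w y true := by
  unfold tvB
  by_cases h1 : w = y
  · subst h1; simp [g_self]
  · by_cases h2 : w > y
    · simp [h1, h2, g_gt w y true h2]
    · push_neg at h2
      simp only [h1, if_false, not_lt_of_ge h2, if_false]
      exact hinv h2

lemma loopB_inv (x y : Int) (hx : -1 ≤ x ∨ y ≤ x + 1) :
    ∀ (n : Nat) (v : Int), (v - x + 1).toNat ≤ n → v ≤ y →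
    ∀ T F, DPInv y v T F → DPInv y (x - 1) (loopB x y v T F).1 (loopB x y v T F).2 := by
  intro n
  induction n with
  | zero =>
    intro v hn hvy T F hinv
    have hvx : ¬ v ≥ x := by omega
    rw [loopB.eq_def, dif_neg hvx]
    intro w hw1 hw2
    exact hinv w (by omega) hw2
  | succ n ih =>
    intro v hn hvy T F hinv
    by_cases hvx : v ≥ x
    · rw [loopB.eq_def, dif_pos hvx]
      by_cases hvey : v = y
      · subst hvey
        simp only [if_pos rfl]
        apply ih (v - 1) (by omega) (by omega)
        intro w hw1 hw2
        have hwv : w = v := by omega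
        subst hwv
        constructor <;> intro _ <;>
          simp [PySem.Dict.getD_insert, g_self]
      · rw [if_neg hvey]
        simp only []
        have hvly : v < y := lt_of_le_of_ne hvy hvey
        -- the value written into F at key v
        have hs : tvB T y (v + 1) + tvB T y (v + 2) = g v y false := by
          rw [tvB_eq T y v (v + 1) (by omega)
                (fun hle => (hinv (v + 1) (by omega) hle).1 (by omega)),
              tvB_eq T y v (v + 2) (by omega)
                (fun hle => (hinv (v + 2) (by omega) hle).1 (by omega)),
              g_step_false v y (by omega) hvly]
        apply ih (v - 1) (by omega) (by omega)
        intro w hw1 hw2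
        by_cases hwv : w = v
        · subst hwv
          constructor
          · intro hw0'
            have hw0 : 0 ≤ w := by rcases hw0' with h' | h' <;> omega
            rw [PySem.Dict.getD_insert, if_pos rfl]
            rw [g_step_true w y hw0 hvly, ← g_step_false w y (by omega) hvly]
            have hflip : g w y false = tvB T y (w + 1) + tvB T y (w + 2) := hs.symm
            by_cases hc : 2 * w > y
            · rw [if_pos hc, g_gt (w * 2) y false (by omega)]
              omega
            · rw [if_neg hc]
              push_neg at hc
              by_cases hw0' : w = 0
              · subst hw0'
                rw [PySem.Dict.getD_insert]
                simp only [mul_zero, zero_mul, if_pos]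
                omega
              · have h2w : w < 2 * w := by omega
                rw [PySem.Dict.getD_insert, if_neg (by omega : (2 : Int) * w ≠ w)]
                have hF := (hinv (2 * w) (by omega) hc).2 (Or.inl (by omega))
                rw [hF, (by ring : w * 2 = 2 * w)]
                omega
          · intro _
            rw [PySem.Dict.getD_insert, if_pos rfl]
            exact hs
        · have hw1' : v < w := by omega
          have hold := hinv w hw1' hw2
          constructor
          · intro hw0
            rw [PySem.Dict.getD_insert, if_neg hwv]
            exact hold.1 hw0
          · intro hw0
            rw [PySem.Dict.getD_insert, if_neg hwv]
            exact hold.2 hw0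
    · rw [loopB.eq_def, dif_neg hvx]
      intro w hw1 hw2
      exact hinv w (by omega) hw2

lemma f_alt_eq_g (x y : Int) (Flag : Bool) (h : Pre_f x y Flag) :
    f_alt x y Flag = g x y Flag := by
  unfold f_alt
  by_cases hgt : x > y
  · rw [if_pos hgt, g_gt x y Flag hgt]
  · rw [if_neg hgt]
    push_neg at hgt
    unfold Pre_f at h
    have hx : -1 ≤ x ∨ y ≤ x + 1 := by
      rcases h with h' | h' | h'
      · right; omega
      · left; omega
      · exact h'.2
    have hinv0 : DPInv y y PySem.Dict.empty PySem.Dict.empty := by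
      intro w hw1 hw2; omega
    have hres := loopB_inv x y hx (y - x + 1).toNat y (by omega) le_rfl
      PySem.Dict.empty PySem.Dict.empty hinv0
    have hxw := hres x (by omega) hgt
    cases Flag with
    | true =>
      have hx0 : 0 ≤ x ∨ x = y := by
        rcases h with h' | h' | h'
        · right; omega
        · left; exact h'
        · exact absurd h'.1 (by simp)
      simpa using hxw.1 hx0
    | false =>
      have : 0 ≤ x ∨ x = -1 ∨ y ≤ x + 1 := by omega
      simpa using hxw.2 this

-- ===== VERDICT (by name: the statement is the Claim_ definition above) =====
theorem f_spec : Claim_equal_f := by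
  intro x y Flag _ hpre
  unfold Spec_f
  rw [f_eq_g x y Flag hpre, f_alt_eq_g x y Flag hpre]
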